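-- pv_equiv track=rewrite | github.com/develooper1994/ocr_toolkit | detection/LPR/platerecognition/utils.py | reorder_motorbike_plate
-- ===== SOURCE A (Python) =====
-- def reorder_motorbike_plate(plate_name):
--     """
--     Reorder if licence plate characters are mixed or does not standart. For TR licence plates
--
--     Parameters:
--         plate_name(str): Digital name of plate
--
--     Return:
--         new_plate(str): Reordered licence plate if process performed. Otherwise, return original frame
--
--     Tip:
--         Uncomment "prints" right below to understand clearly what happens after process plate characters. Feed function with motorbike image!
--     """
--
--     ##if province code has been found
--     if plate_name[:2].isnumeric():
--         new_plate = plate_name[:2]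
--         a = b = ""
--         for i in range(len(plate_name) - 2):
--             if (plate_name[i + 2].isnumeric()):
--                 a += plate_name[i + 2]
--             else:
--                 b += plate_name[i + 2]
--         new_plate += b + a
--         return new_plate
--     return plate_name
-- ===== SOURCE B (Python) =====
-- def reorder_motorbike_plate(plate_name):
--     # One stable sort: non-numeric chars (key False) first, numeric (key True) after,
--     # each group keeping its original order.
--     if plate_name[:2].isnumeric():
--         return plate_name[:2] + ''.join(sorted(plate_name[2:], key=str.isnumeric))
--     return plate_name
-- ===== Notes on version B (the rewrite author's own statement) =====
-- stated objective: idiomatic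
-- what changed: A's explicit index loop that accumulates digit and non-digit characters into two strings is replaced by a single stable sort of the suffix keyed on str.isnumeric (False-keyed non-digits stay in front, digits follow), joined after the two-char prefix.
import Mathlib
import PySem

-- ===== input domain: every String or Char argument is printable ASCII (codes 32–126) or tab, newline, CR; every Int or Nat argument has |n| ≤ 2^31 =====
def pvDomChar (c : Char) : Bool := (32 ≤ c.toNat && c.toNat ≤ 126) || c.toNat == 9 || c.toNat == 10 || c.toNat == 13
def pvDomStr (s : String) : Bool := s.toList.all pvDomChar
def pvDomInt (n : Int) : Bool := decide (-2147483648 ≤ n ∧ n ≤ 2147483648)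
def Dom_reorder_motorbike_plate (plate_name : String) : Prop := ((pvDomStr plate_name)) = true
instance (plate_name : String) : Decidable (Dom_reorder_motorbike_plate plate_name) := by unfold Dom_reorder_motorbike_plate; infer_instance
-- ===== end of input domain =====

-- B replaces A's index loop building the two groups by one stable sort on the numeric-ness
-- key (objective: idiomatic one-liner; no speed claim).
-- str.isnumeric is ported as PySem.Chars.isdigit/strIsdigit: exact on the ASCII domain.

-- ===== PORT A =====
def reorder_motorbike_plate (plate_name : String) : String :=
  let cs := plate_name.toList
  if PySem.Chars.strIsdigit (PySem.List.slice cs none (some 2)) then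
    -- new_plate = plate_name[:2]; a = b = ""; for i in range(len(plate_name) - 2): …
    let ab := (PySem.List.pyRange 0 ((cs.length : Int) - 2) 1).foldl
      (fun (ab : List Char × List Char) i =>
        let c := PySem.List.pyGetD cs (i + 2) ' '   -- index always in range in Python
        if PySem.Chars.isdigit c then (ab.1 ++ [c], ab.2) else (ab.1, ab.2 ++ [c]))
      ([], [])
    String.ofList (PySem.List.slice cs none (some 2) ++ (ab.2 ++ ab.1))
  else plate_name

-- ===== PORT B =====
def reorder_motorbike_plate_alt (plate_name : String) : String :=
  let cs := plate_name.toList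
  if PySem.Chars.strIsdigit (PySem.List.slice cs none (some 2)) then
    String.ofList (PySem.List.slice cs none (some 2) ++
      PySem.List.sorted (PySem.List.slice cs (some 2) none) (fun c => PySem.Chars.isdigit c))
  else plate_name

-- ===== PRECONDITION & SPEC =====
def Spec_reorder_motorbike_plate (plate_name : String) (out : String) : Prop := out = reorder_motorbike_plate_alt plate_name
instance (plate_name : String) (out : String) : Decidable (Spec_reorder_motorbike_plate plate_name out) := by unfold Spec_reorder_motorbike_plate; infer_instance

-- ===== CLAIM (what is proved, stated in full; the proofs are below) =====
def Claim_equal_reorder_motorbike_plate : Prop := ∀ (plate_name : String), Dom_reorder_motorbike_plate plate_name → Spec_reorder_motorbike_plate plate_name (reorder_motorbike_plate plate_name)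

-- ===== LEMMAS AND PROOFS =====

-- A's loop over range(len - 2) reading plate_name[i + 2] is a fold over the suffix after the prefix.
theorem foldl_range_getD {β : Type} (g : β → Char → β) (d : Char) :
    ∀ (suf pre : List Char) (init : β),
      (List.range suf.length).foldl
        (fun st (i : Nat) => g st (PySem.List.pyGetD (pre ++ suf) ((i : Int) + (pre.length : Int)) d)) init
      = suf.foldl g init := by
  intro suf
  induction suf with
  | nil => intro pre init; simp
  | cons c t ih =>
    intro pre init
    have hr : List.range (t.length + 1) = 0 :: (List.range t.length).map Nat.succ :=
      List.range_succ_eq_map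
    simp only [List.length_cons, hr, List.foldl_cons, List.foldl_map]
    have h0 : PySem.List.pyGetD (pre ++ c :: t) (((0 : Nat) : Int) + (pre.length : Int)) d = c := by
      rw [show ((0 : Nat) : Int) + (pre.length : Int) = ((pre.length : Nat) : Int) by push_cast; ring]
      rw [PySem.List.pyGetD_natCast]
      simp
    rw [h0]
    have hrec := ih (pre ++ [c]) (g init c)
    rw [← hrec]
    apply PySem.List.foldl_congr_mem
    intro st i hi
    have hl : pre ++ c :: t = (pre ++ [c]) ++ t := by simp
    rw [hl]
    congr 1
    simp only [List.length_append, List.length_cons, List.length_nil]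
    push_cast
    ring_nf

-- The accumulator of A's loop holds the two groups as appended filters.
theorem foldl_partition (key : Char → Bool) :
    ∀ (l : List Char) (a b : List Char),
      l.foldl (fun (ab : List Char × List Char) c =>
          if key c then (ab.1 ++ [c], ab.2) else (ab.1, ab.2 ++ [c])) (a, b)
      = (a ++ l.filter key, b ++ l.filter (fun c => !key c)) := by
  intro l
  induction l with
  | nil => intro a b; simp
  | cons c t ih =>
    intro a b
    by_cases h : key c = true <;>
      simp [List.foldl_cons, h, ih, List.append_assoc]

-- A stable sort on a Bool key is the stable partition: key-false chars first, key-true after.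
theorem sorted_bool_key (key : Char → Bool) (l : List Char) :
    PySem.List.sorted l key = l.filter (fun c => !key c) ++ l.filter key := by
  rw [PySem.List.sorted_eq_foldl_insertBy]
  suffices h : ∀ (l A B : List Char), (∀ x ∈ A, key x = false) → (∀ x ∈ B, key x = true) →
      l.foldl (fun acc x => PySem.List.insertBy (fun a b => decide (key a < key b)) x acc) (A ++ B)
      = (A ++ l.filter (fun c => !key c)) ++ (B ++ l.filter key) by
    simpa using h l [] [] (by simp) (by simp)
  intro l
  induction l with
  | nil => intro A B _ _; simp
  | cons c t ih =>
    intro A B hA hB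
    simp only [List.foldl_cons]
    by_cases hc : key c = true
    · -- key c = true: c is never strictly below an element, so it goes to the very end
      have hins : PySem.List.insertBy (fun a b => decide (key a < key b)) c (A ++ B)
          = (A ++ B) ++ [c] := by
        apply PySem.List.insertBy_of_forall_not_before
        intro y hy
        rcases List.mem_append.mp hy with h | h
        · simp [hA y h, hc]
        · simp [hB y h, hc]
      rw [hins, List.append_assoc, ih A (B ++ [c]) hA (by
        intro x hx
        rcases List.mem_append.mp hx with h | h
        · exact hB x h
        · simp at h; simpa [h] using hc)]
      simp [hc, List.append_assoc]
    · -- key c = false: c passes all of A and lands right before B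
      have hb : key c = false := by simpa using hc
      have hins : ∀ (A' : List Char), (∀ x ∈ A', key x = false) →
          PySem.List.insertBy (fun a b => decide (key a < key b)) c (A' ++ B)
          = A' ++ [c] ++ B := by
        intro A'
        induction A' with
        | nil =>
          intro _
          cases B with
          | nil => simp [PySem.List.insertBy]
          | cons x xs =>
            have hx : key x = true := hB x (by simp)
            simp [PySem.List.insertBy, hx, hb]
        | cons a as iha =>
          intro hA'
          have ha : key a = false := hA' a (by simp)
          simp only [List.cons_append, PySem.List.insertBy, ha, hb]
          simp [iha (fun x hx => hA' x (by simp [hx]))]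
      rw [hins A hA,
        ih (A ++ [c]) B (by
          intro x hx
          rcases List.mem_append.mp hx with h | h
          · exact hA x h
          · simp at h; simpa [h] using hb) hB]
      simp [hb, List.append_assoc]

theorem loop_eq_filters (cs : List Char) :
    (PySem.List.pyRange 0 ((cs.length : Int) - 2) 1).foldl
      (fun (ab : List Char × List Char) i =>
        let c := PySem.List.pyGetD cs (i + 2) ' '
        if PySem.Chars.isdigit c then (ab.1 ++ [c], ab.2) else (ab.1, ab.2 ++ [c]))
      ([], [])
    = ((cs.drop 2).filter (fun c => PySem.Chars.isdigit c),
       (cs.drop 2).filter (fun c => !PySem.Chars.isdigit c)) := by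
  by_cases hsmall : cs.length < 2
  · have h1 : ((cs.length : Int) - 2).toNat = 0 := by omega
    have h2 : PySem.List.pyRange 0 ((cs.length : Int) - 2) 1 = [] := by
      rw [PySem.List.pyRange_one]
      simp [h1]
    have h3 : cs.drop 2 = [] := by
      apply List.drop_eq_nil_of_le; omega
    simp [h2, h3]
  · rw [not_lt] at hsmall
    rw [PySem.List.pyRange_one]
    have hlen : ((cs.length : Int) - 2 - 0).toNat = (cs.drop 2).length := by
      simp [List.length_drop]; omega
    rw [hlen, List.foldl_map]
    have hsplit : cs.take 2 ++ cs.drop 2 = cs := List.take_append_drop 2 cs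
    have hlen2 : ((cs.take 2).length : Int) = 2 := by
      simp [List.length_take]; omega
    have := foldl_range_getD
      (fun (ab : List Char × List Char) c =>
        if PySem.Chars.isdigit c then (ab.1 ++ [c], ab.2) else (ab.1, ab.2 ++ [c])) ' '
      (cs.drop 2) (cs.take 2) ([], [])
    rw [hsplit, hlen2] at this
    have hpart := foldl_partition (fun c => PySem.Chars.isdigit c) (cs.drop 2) [] []
    simp only [List.nil_append] at hpart
    rw [← hpart, ← this]
    apply PySem.List.foldl_congr_mem
    intro st i hi
    simp [zero_add]

-- ===== VERDICT (by name: the statement is the Claim_ definition above) =====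
theorem reorder_motorbike_plate_spec : Claim_equal_reorder_motorbike_plate := by
  intro plate_name _
  unfold Spec_reorder_motorbike_plate reorder_motorbike_plate reorder_motorbike_plate_alt
  set cs := plate_name.toList with hcs
  by_cases hguard : PySem.Chars.strIsdigit (PySem.List.slice cs none (some 2)) = true
  · simp only [hguard, if_true, loop_eq_filters cs]
    have hsl2 : PySem.List.slice cs (some 2) none = cs.drop 2 := by
      simpa using PySem.List.slice_from_natCast cs 2
    rw [hsl2, sorted_bool_key]
  · simp [hguard]
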